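-- pv_equiv track=rewrite | github.com/allan-tulane/sp24-assignment-03-juliarenner | main.py | fast_align_MED
-- ===== SOURCE A (Python) =====
-- def fast_align_MED(S, T, MED={}):
--   if (S, T) in MED:
--     return MED[(S, T)]
--   elif S == "":
--     MED[(S, T)] = ("-" * len(T), T)
--     return MED[(S, T)]
--   elif T == "":
--     MED[(S, T)] = (S, "-" * len(S))
--     return MED[(S, T)]
--   else:
--     if S[0] == T[0]:
--       S_aligned, T_aligned = fast_align_MED(S[1:], T[1:], MED)
--       MED[(S, T)] = (S[0] + S_aligned, T[0] + T_aligned)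
--     else:
--       S_insert, T_insert = fast_align_MED(S, T[1:], MED)
--       S_delete, T_delete = fast_align_MED(S[1:], T, MED)
--
--       insertcost = 1 + len(S_insert)
--       deletecost = 1 + len(S_delete)
--
--       if insertcost <= deletecost:
--         MED[(S, T)] = ("-" + S_insert, T[0] + T_insert)
--       else:
--         MED[(S, T)] = (S[0] + S_delete, "-" + T_delete)
--
--   return MED[(S, T)]
-- ===== SOURCE B (Python) =====
-- def fast_align_MED(S, T, MED={}):
--     # Iterative two-row DP over suffixes (no recursion, no per-pair memo dict);
--     # NOTE: unlike the original, MED is only read, never mutated.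
--     n, m = len(S), len(T)
--     prev = []
--     for i in range(n, -1, -1):
--         s = S[i:]
--         row = []
--         for j in range(m, -1, -1):
--             t = T[j:]
--             if (s, t) in MED:
--                 c = MED[(s, t)]
--             elif s == "":
--                 c = ("-" * len(t), t)
--             elif t == "":
--                 c = (s, "-" * len(s))
--             elif s[0] == t[0]:
--                 a, b = prev[j + 1]
--                 c = (s[0] + a, t[0] + b)
--             else:
--                 si, ti = row[0]
--                 sd, td = prev[j]
--                 if len(si) <= len(sd):
--                     c = ("-" + si, t[0] + ti)
--                 else:
--                     c = (s[0] + sd, "-" + td)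
--             row = [c] + row
--         prev = row
--     return prev[0]
-- ===== Notes on version B (the rewrite author's own statement) =====
-- stated objective: alternative
-- what changed: A's memoized top-down recursion over a growing dict of (suffix,suffix) keys is replaced by an iterative bottom-up dynamic program that fills the suffix table two rows at a time (the seeded MED entries are consulted per cell); B needs no recursion and no memo dict.
import Mathlib
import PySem

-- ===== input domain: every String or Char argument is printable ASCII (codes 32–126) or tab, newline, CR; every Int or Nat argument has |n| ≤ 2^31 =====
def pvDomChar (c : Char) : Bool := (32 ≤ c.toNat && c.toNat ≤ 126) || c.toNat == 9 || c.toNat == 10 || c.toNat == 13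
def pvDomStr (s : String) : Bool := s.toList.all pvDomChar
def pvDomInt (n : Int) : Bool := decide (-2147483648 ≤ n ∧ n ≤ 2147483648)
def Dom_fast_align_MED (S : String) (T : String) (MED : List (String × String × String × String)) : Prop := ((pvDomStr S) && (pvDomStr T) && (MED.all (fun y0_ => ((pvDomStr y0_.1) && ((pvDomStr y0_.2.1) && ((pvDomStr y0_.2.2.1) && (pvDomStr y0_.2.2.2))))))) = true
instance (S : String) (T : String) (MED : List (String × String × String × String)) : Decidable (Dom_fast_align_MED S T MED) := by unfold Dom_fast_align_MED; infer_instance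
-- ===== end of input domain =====

-- B replaces A's memoized top-down recursion by an iterative two-row bottom-up DP over suffixes
-- (objective: alternative; equivalence is about the RETURN value only — Python A also mutates its MED argument, B does not).


-- ===== PORT A =====
-- The Python memo dict MED maps (str, str) pairs to (str, str) pairs; we key it by the
-- character lists of the two strings (String equality in Python is exactly equality of
-- the character lists, so lookups agree).  Mutation of MED is threaded as state.
def pvMedDictA (MED : List (String × String × String × String)) :
    PySem.Dict (List Char × List Char) (String × String) :=
  MED.foldl (fun d q => d.insert (q.1.toList, q.2.1.toList) (q.2.2.1, q.2.2.2)) PySem.Dict.empty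

-- literal transliteration of A's recursion: memo lookup first, then the two base cases,
-- then matched heads / the two sequential recursive calls with the length comparison.
-- (A's trailing 'return MED[(S, T)]' re-reads the entry just written, i.e. the value v.)
def pvGoA (s t : List Char) (med : PySem.Dict (List Char × List Char) (String × String)) :
    (String × String) × PySem.Dict (List Char × List Char) (String × String) :=
  match med.get? (s, t) with
  | some v => (v, med)
  | none =>
    match s, t with
    | [], t =>
      let v := (String.ofList (List.replicate t.length '-'), String.ofList t)
      (v, med.insert (([] : List Char), t) v)
    | c :: s', [] =>
      let v := (String.ofList (c :: s'), String.ofList (List.replicate (c :: s').length '-'))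
      (v, med.insert ((c :: s', ([] : List Char))) v)
    | c :: s', d :: t' =>
      if c = d then
        let r := pvGoA s' t' med
        let v := (String.ofList (c :: r.1.1.toList), String.ofList (d :: r.1.2.toList))
        (v, r.2.insert ((c :: s', d :: t')) v)
      else
        let r1 := pvGoA (c :: s') t' med          -- insert branch: fast_align_MED(S, T[1:], MED)
        let r2 := pvGoA s' (d :: t') r1.2          -- delete branch: fast_align_MED(S[1:], T, MED)
        if 1 + r1.1.1.toList.length ≤ 1 + r2.1.1.toList.length then
          let v := (String.ofList ('-' :: r1.1.1.toList), String.ofList (d :: r1.1.2.toList))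
          (v, r2.2.insert ((c :: s', d :: t')) v)
        else
          let v := (String.ofList (c :: r2.1.1.toList), String.ofList ('-' :: r2.1.2.toList))
          (v, r2.2.insert ((c :: s', d :: t')) v)
termination_by s.length + t.length
decreasing_by all_goals (simp only [List.length_cons]; omega)

def fast_align_MED (S : String) (T : String) (MED : List (String × String × String × String)) : String × String :=
  (pvGoA S.toList T.toList (pvMedDictA MED)).1

-- ===== PORT B =====
-- one cell of B's DP table: the body of B's inner loop for suffix pair (S[i:], T[j:]);
-- 'row' is the row built so far (cells j+1..m of row i, most recent first), 'prev' is row i+1.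
-- List.getD ports Python's prev[j+1] / row[0] / prev[j]: whenever those branches are reached
-- the index is in range (s ≠ "" forces i < n, t ≠ "" forces j < m), so the default is never read.
def pvCellB (med0 : PySem.Dict (List Char × List Char) (String × String)) (Sc Tc : List Char)
    (i j : Nat) (prev row : List (String × String)) : String × String :=
  let s := Sc.drop i
  let t := Tc.drop j
  match med0.get? (s, t) with
  | some v => v
  | none =>
    match s, t with
    | [], t => (String.ofList (List.replicate t.length '-'), String.ofList t)
    | c :: s0, [] => (String.ofList (c :: s0), String.ofList (List.replicate (c :: s0).length '-'))
    | c :: s0, d :: t0 =>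
      if c = d then
        let p := prev.getD (j + 1) ("", "")
        (String.ofList (c :: p.1.toList), String.ofList (d :: p.2.toList))
      else
        let l := row.getD 0 ("", "")
        let u := prev.getD j ("", "")
        if l.1.toList.length ≤ u.1.toList.length then
          (String.ofList ('-' :: l.1.toList), String.ofList (d :: l.2.toList))
        else
          (String.ofList (c :: u.1.toList), String.ofList ('-' :: u.2.toList))

-- B's inner loop: for j in range(m, -1, -1): row = [cell] + row
def pvRowLoopB (med0 : PySem.Dict (List Char × List Char) (String × String)) (Sc Tc : List Char)
    (i : Nat) (prev : List (String × String)) :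
    Nat → List (String × String) → List (String × String)
  | 0, row => pvCellB med0 Sc Tc i 0 prev row :: row
  | j + 1, row => pvRowLoopB med0 Sc Tc i prev j (pvCellB med0 Sc Tc i (j + 1) prev row :: row)

-- B's outer loop: for i in range(n, -1, -1): prev = row
def pvRowsLoopB (med0 : PySem.Dict (List Char × List Char) (String × String)) (Sc Tc : List Char)
    (m : Nat) : Nat → List (String × String) → List (String × String)
  | 0, prev => pvRowLoopB med0 Sc Tc 0 prev m []
  | i + 1, prev => pvRowsLoopB med0 Sc Tc m i (pvRowLoopB med0 Sc Tc (i + 1) prev m [])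

def fast_align_MED_alt (S : String) (T : String) (MED : List (String × String × String × String)) : String × String :=
  -- final prev has length m+1 ≥ 1, so prev[0] is its head (default never read)
  (pvRowsLoopB (pvMedDictA MED) S.toList T.toList T.toList.length S.toList.length []).headD ("", "")

-- ===== PRECONDITION & SPEC =====
def Spec_fast_align_MED (S : String) (T : String) (MED : List (String × String × String × String)) (out : String × String) : Prop := out = fast_align_MED_alt S T MED
instance (S : String) (T : String) (MED : List (String × String × String × String)) (out : String × String) : Decidable (Spec_fast_align_MED S T MED out) := by unfold Spec_fast_align_MED; infer_instance

-- ===== CLAIM (what is proved, stated in full; the proofs are below) =====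
def Claim_equal_fast_align_MED : Prop := ∀ (S : String) (T : String) (MED : List (String × String × String × String)), Dom_fast_align_MED S T MED → Spec_fast_align_MED S T MED (fast_align_MED S T MED)

-- ===== LEMMAS AND PROOFS =====

-- the common functional specification: the alignment of (s, t) determined by the INITIAL memo
-- med0 (a seeded entry wins; otherwise A's recurrence)
def pvAlignF (med0 : PySem.Dict (List Char × List Char) (String × String)) :
    List Char → List Char → String × String
  | s, t =>
    match med0.get? (s, t) with
    | some v => v
    | none =>
      match s, t with
      | [], t => (String.ofList (List.replicate t.length '-'), String.ofList t)
      | c :: s', [] => (String.ofList (c :: s'), String.ofList (List.replicate (c :: s').length '-'))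
      | c :: s', d :: t' =>
        if c = d then
          let r := pvAlignF med0 s' t'
          (String.ofList (c :: r.1.toList), String.ofList (d :: r.2.toList))
        else
          let r1 := pvAlignF med0 (c :: s') t'
          let r2 := pvAlignF med0 s' (d :: t')
          if 1 + r1.1.toList.length ≤ 1 + r2.1.toList.length then
            (String.ofList ('-' :: r1.1.toList), String.ofList (d :: r1.2.toList))
          else
            (String.ofList (c :: r2.1.toList), String.ofList ('-' :: r2.2.toList))
termination_by s t => s.length + t.length
decreasing_by all_goals (simp only [List.length_cons]; omega)

-- invariant of A's memo state: it still contains every seeded entry, and every entry it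
-- contains is the pvAlignF value of its key
def pvInvA (med0 med : PySem.Dict (List Char × List Char) (String × String)) : Prop :=
  (∀ k v, med0.get? k = some v → med.get? k = some v) ∧
  (∀ k v, med.get? k = some v → v = pvAlignF med0 k.1 k.2)

theorem pvAlignF_of_seeded (med0 : PySem.Dict (List Char × List Char) (String × String))
    (s t : List Char) (v : String × String) (h : med0.get? (s, t) = some v) :
    pvAlignF med0 s t = v := by
  simp only [pvAlignF.eq_def, h]

theorem pvInvA_insert (med0 med : PySem.Dict (List Char × List Char) (String × String))
    (s t : List Char) (h : pvInvA med0 med) :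
    pvInvA med0 (med.insert (s, t) (pvAlignF med0 s t)) := by
  constructor
  · intro k v hk
    rcases eq_or_ne k (s, t) with rfl | hne
    · rw [PySem.Dict.get?_insert_self, pvAlignF_of_seeded med0 s t v hk]
    · rw [PySem.Dict.get?_insert_of_ne _ _ hne]; exact h.1 k v hk
  · intro k v hk
    rcases eq_or_ne k (s, t) with rfl | hne
    · rw [PySem.Dict.get?_insert_self] at hk
      simpa using hk.symm
    · rw [PySem.Dict.get?_insert_of_ne _ _ hne] at hk; exact h.2 k v hk

theorem pvGoA_spec (med0 : PySem.Dict (List Char × List Char) (String × String)) :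
    ∀ N s t med, s.length + t.length ≤ N → pvInvA med0 med →
      (pvGoA s t med).1 = pvAlignF med0 s t ∧ pvInvA med0 (pvGoA s t med).2 := by
  intro N
  induction N using Nat.strong_induction_on with
  | _ N ih =>
    intro s t med hlen hinv
    cases hmed : med.get? (s, t) with
    | some v =>
      have h1 : pvGoA s t med = (v, med) := by
        conv_lhs => rw [pvGoA.eq_def]
        simp only [hmed]
      rw [h1]
      exact ⟨by simpa using hinv.2 (s, t) v hmed, hinv⟩
    | none =>
      have hm0 : med0.get? (s, t) = none := by
        cases h : med0.get? (s, t) with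
        | none => rfl
        | some w => rw [hinv.1 (s, t) w h] at hmed; cases hmed
      cases s with
      | nil =>
        have halign : pvAlignF med0 [] t =
            (String.ofList (List.replicate t.length '-'), String.ofList t) := by
          rw [pvAlignF.eq_def]
          simp only [hm0]
        have h1 : pvGoA [] t med =
            ((String.ofList (List.replicate t.length '-'), String.ofList t),
              med.insert (([] : List Char), t)
                (String.ofList (List.replicate t.length '-'), String.ofList t)) := by
          conv_lhs => rw [pvGoA.eq_def]
          simp only [hmed]
        rw [h1, halign]
        exact ⟨rfl, by have := pvInvA_insert med0 med [] t hinv; rwa [halign] at this⟩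
      | cons c s' =>
        cases t with
        | nil =>
          have halign : pvAlignF med0 (c :: s') [] =
              (String.ofList (c :: s'), String.ofList (List.replicate (c :: s').length '-')) := by
            rw [pvAlignF.eq_def]
            simp only [hm0]
          have h1 : pvGoA (c :: s') [] med =
              ((String.ofList (c :: s'), String.ofList (List.replicate (c :: s').length '-')),
                med.insert ((c :: s', ([] : List Char)))
                  (String.ofList (c :: s'), String.ofList (List.replicate (c :: s').length '-'))) := by
            conv_lhs => rw [pvGoA.eq_def]
            simp only [hmed]
          rw [h1, halign]
          exact ⟨rfl, by have := pvInvA_insert med0 med (c :: s') [] hinv; rwa [halign] at this⟩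
        | cons d t' =>
          have hlen' : s'.length + t'.length + 2 ≤ N := by
            simp only [List.length_cons] at hlen; omega
          by_cases hcd : c = d
          · have IH := ih (N - 1) (by omega) s' t' med (by omega) hinv
            have h1 : pvGoA (c :: s') (d :: t') med =
                ((String.ofList (c :: (pvGoA s' t' med).1.1.toList),
                  String.ofList (d :: (pvGoA s' t' med).1.2.toList)),
                 (pvGoA s' t' med).2.insert ((c :: s', d :: t'))
                   (String.ofList (c :: (pvGoA s' t' med).1.1.toList),
                    String.ofList (d :: (pvGoA s' t' med).1.2.toList))) := by
              conv_lhs => rw [pvGoA.eq_def]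
              simp only [hmed, if_pos hcd]
            have halign : pvAlignF med0 (c :: s') (d :: t') =
                (String.ofList (c :: (pvAlignF med0 s' t').1.toList),
                 String.ofList (d :: (pvAlignF med0 s' t').2.toList)) := by
              conv_lhs => rw [pvAlignF.eq_def]
              simp only [hm0, if_pos hcd]
            rw [h1, IH.1]
            constructor
            · rw [halign]
            · have := pvInvA_insert med0 (pvGoA s' t' med).2 (c :: s') (d :: t') IH.2
              rw [halign] at this
              exact this
          · have IH1 := ih (N - 1) (by omega) (c :: s') t' med
              (by simp only [List.length_cons]; omega) hinv
            have IH2 := ih (N - 1) (by omega) s' (d :: t') (pvGoA (c :: s') t' med).2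
              (by simp only [List.length_cons]; omega) IH1.2
            have halign : pvAlignF med0 (c :: s') (d :: t') =
                (if 1 + (pvAlignF med0 (c :: s') t').1.toList.length ≤
                    1 + (pvAlignF med0 s' (d :: t')).1.toList.length then
                  (String.ofList ('-' :: (pvAlignF med0 (c :: s') t').1.toList),
                   String.ofList (d :: (pvAlignF med0 (c :: s') t').2.toList))
                else
                  (String.ofList (c :: (pvAlignF med0 s' (d :: t')).1.toList),
                   String.ofList ('-' :: (pvAlignF med0 s' (d :: t')).2.toList))) := by
              conv_lhs => rw [pvAlignF.eq_def]
              simp only [hm0, if_neg hcd]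
            have h1 : pvGoA (c :: s') (d :: t') med =
                (if 1 + (pvGoA (c :: s') t' med).1.1.toList.length ≤
                    1 + (pvGoA s' (d :: t') (pvGoA (c :: s') t' med).2).1.1.toList.length then
                  ((String.ofList ('-' :: (pvGoA (c :: s') t' med).1.1.toList),
                    String.ofList (d :: (pvGoA (c :: s') t' med).1.2.toList)),
                   (pvGoA s' (d :: t') (pvGoA (c :: s') t' med).2).2.insert ((c :: s', d :: t'))
                     (String.ofList ('-' :: (pvGoA (c :: s') t' med).1.1.toList),
                      String.ofList (d :: (pvGoA (c :: s') t' med).1.2.toList)))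
                else
                  ((String.ofList (c :: (pvGoA s' (d :: t') (pvGoA (c :: s') t' med).2).1.1.toList),
                    String.ofList ('-' :: (pvGoA s' (d :: t') (pvGoA (c :: s') t' med).2).1.2.toList)),
                   (pvGoA s' (d :: t') (pvGoA (c :: s') t' med).2).2.insert ((c :: s', d :: t'))
                     (String.ofList (c :: (pvGoA s' (d :: t') (pvGoA (c :: s') t' med).2).1.1.toList),
                      String.ofList ('-' :: (pvGoA s' (d :: t') (pvGoA (c :: s') t' med).2).1.2.toList)))) := by
              conv_lhs => rw [pvGoA.eq_def]
              simp only [hmed, if_neg hcd]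
            rw [h1, IH1.1, IH2.1]
            have hins := pvInvA_insert med0 (pvGoA s' (d :: t') (pvGoA (c :: s') t' med).2).2
              (c :: s') (d :: t') IH2.2
            rw [halign] at hins
            by_cases hle : 1 + (pvAlignF med0 (c :: s') t').1.toList.length ≤
                1 + (pvAlignF med0 s' (d :: t')).1.toList.length
            · rw [if_pos hle]
              rw [if_pos hle] at hins
              constructor
              · rw [halign, if_pos hle]
              · exact hins
            · rw [if_neg hle]
              rw [if_neg hle] at hins
              constructor
              · rw [halign, if_neg hle]
              · exact hins

-- row i of the DP table as pvAlignF values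
def pvRowSpec (med0 : PySem.Dict (List Char × List Char) (String × String)) (Sc Tc : List Char)
    (i : Nat) : List (String × String) :=
  (List.range (Tc.length + 1)).map (fun j => pvAlignF med0 (Sc.drop i) (Tc.drop j))

theorem pvCellB_eq (med0 : PySem.Dict (List Char × List Char) (String × String)) (Sc Tc : List Char)
    (i j : Nat) (prev row : List (String × String)) (hj : j ≤ Tc.length)
    (hprev : i < Sc.length → prev = pvRowSpec med0 Sc Tc (i + 1))
    (hrow : j < Tc.length → row.headD ("", "") = pvAlignF med0 (Sc.drop i) (Tc.drop (j + 1))) :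
    pvCellB med0 Sc Tc i j prev row = pvAlignF med0 (Sc.drop i) (Tc.drop j) := by
  have hgetD : ∀ (jj i' : Nat), jj < Tc.length + 1 →
      (pvRowSpec med0 Sc Tc i').getD jj ("", "") = pvAlignF med0 (Sc.drop i') (Tc.drop jj) := by
    intro jj i' h
    simp [pvRowSpec, List.getD_eq_getElem?_getD, h]
  cases hmed : med0.get? (Sc.drop i, Tc.drop j) with
  | some v =>
    rw [pvAlignF_of_seeded _ _ _ _ hmed]
    simp only [pvCellB, hmed]
  | none =>
    cases hs : Sc.drop i with
    | nil =>
      simp only [pvCellB, pvAlignF.eq_def, hs]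
    | cons c s0 =>
      have hi : i < Sc.length := by
        by_contra hle
        rw [List.drop_eq_nil_of_le (by omega)] at hs; cases hs
      have hdropS : Sc.drop (i + 1) = s0 := by
        rw [← List.tail_drop, hs]; rfl
      cases ht : Tc.drop j with
      | nil =>
        simp only [pvCellB, pvAlignF.eq_def, hs, ht]
      | cons d t0 =>
        have hjlt : j < Tc.length := by
          by_contra hle
          rw [List.drop_eq_nil_of_le (by omega)] at ht; cases ht
        have hdropT : Tc.drop (j + 1) = t0 := by
          rw [← List.tail_drop, ht]; rfl
        have hmed' : med0.get? ((c :: s0, d :: t0)) = none := by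
          rw [← hs, ← ht]; exact hmed
        have hrow' : row.getD 0 ("", "") = pvAlignF med0 (c :: s0) t0 := by
          have h1 : row.getD 0 ("", "") = row.headD ("", "") := by cases row <;> rfl
          rw [h1, hrow hjlt, hs, hdropT]
        rw [hprev hi]
        simp only [pvCellB, hs, ht, hmed', hgetD (j + 1) (i + 1) (by omega),
          hgetD j (i + 1) (by omega), hdropS, hdropT, hrow']
        conv_rhs => rw [pvAlignF.eq_def]
        simp only [hmed']
        by_cases hcd : c = d
        · subst hcd; simp
        · simp only [if_neg hcd]
          simp

theorem pvRowLoopB_eq (med0 : PySem.Dict (List Char × List Char) (String × String))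
    (Sc Tc : List Char) (i : Nat) (prev : List (String × String))
    (hprev : i < Sc.length → prev = pvRowSpec med0 Sc Tc (i + 1)) :
    ∀ j row, j ≤ Tc.length →
      row = (List.range' (j + 1) (Tc.length - j)).map (fun jj => pvAlignF med0 (Sc.drop i) (Tc.drop jj)) →
      pvRowLoopB med0 Sc Tc i prev j row = (List.range' 0 (Tc.length + 1)).map (fun jj => pvAlignF med0 (Sc.drop i) (Tc.drop jj)) := by
  have hheadD : ∀ (a k : Nat) (g : Nat → String × String), 0 < k →
      ((List.range' a k).map g).headD ("", "") = g a := by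
    intro a k g hk
    cases k with
    | zero => omega
    | succ k => simp [List.range'_succ]
  intro j
  induction j with
  | zero =>
    intro row hj hrowv
    simp only [pvRowLoopB]
    rw [pvCellB_eq med0 Sc Tc i 0 prev row (by omega) hprev (by
      intro hm
      rw [hrowv]
      have h1 : Tc.length - 0 = Tc.length := by omega
      rw [h1, hheadD 1 Tc.length _ (by omega)])]
    rw [hrowv]
    have h2 : Tc.length - 0 = Tc.length := by omega
    rw [h2, List.range'_succ, List.map_cons]
  | succ j ih =>
    intro row hj hrowv
    simp only [pvRowLoopB]
    have hcell : pvCellB med0 Sc Tc i (j + 1) prev row =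
        pvAlignF med0 (Sc.drop i) (Tc.drop (j + 1)) := by
      apply pvCellB_eq med0 Sc Tc i (j + 1) prev row (by omega) hprev
      intro hm
      rw [hrowv, hheadD (j + 2) (Tc.length - (j + 1)) _ (by omega)]
    apply ih (pvCellB med0 Sc Tc i (j + 1) prev row :: row) (by omega)
    rw [hcell, hrowv]
    have h3 : Tc.length - j = (Tc.length - (j + 1)) + 1 := by omega
    rw [h3, List.range'_succ, List.map_cons]

theorem pvRowsLoopB_eq (med0 : PySem.Dict (List Char × List Char) (String × String))
    (Sc Tc : List Char) :
    ∀ i prev, i ≤ Sc.length → (i < Sc.length → prev = pvRowSpec med0 Sc Tc (i + 1)) →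
      pvRowsLoopB med0 Sc Tc Tc.length i prev = pvRowSpec med0 Sc Tc 0 := by
  have hrow0 : ∀ (i' : Nat) (prev' : List (String × String)),
      (i' < Sc.length → prev' = pvRowSpec med0 Sc Tc (i' + 1)) →
      pvRowLoopB med0 Sc Tc i' prev' Tc.length [] = pvRowSpec med0 Sc Tc i' := by
    intro i' prev' hprev'
    rw [pvRowLoopB_eq med0 Sc Tc i' prev' hprev' Tc.length [] le_rfl (by simp)]
    rw [pvRowSpec, List.range_eq_range']
  intro i
  induction i with
  | zero =>
    intro prev _ hprev
    simp only [pvRowsLoopB]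
    exact hrow0 0 prev hprev
  | succ i ih =>
    intro prev hi hprev
    simp only [pvRowsLoopB]
    exact ih (pvRowLoopB med0 Sc Tc (i + 1) prev Tc.length []) (by omega)
      (fun hlt => hrow0 (i + 1) prev hprev)

-- ===== VERDICT (by name: the statement is the Claim_ definition above) =====
theorem fast_align_MED_spec : Claim_equal_fast_align_MED := by
  intro S T MED _
  unfold Spec_fast_align_MED fast_align_MED fast_align_MED_alt
  have hinv0 : pvInvA (pvMedDictA MED) (pvMedDictA MED) := by
    constructor
    · intro k v hk; exact hk
    · intro k v hk
      exact (pvAlignF_of_seeded (pvMedDictA MED) k.1 k.2 v (by simpa using hk)).symm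
  have hA := (pvGoA_spec (pvMedDictA MED) (S.toList.length + T.toList.length) S.toList T.toList
      (pvMedDictA MED) le_rfl hinv0).1
  have hB := pvRowsLoopB_eq (pvMedDictA MED) S.toList T.toList S.toList.length []
      le_rfl (by intro h; omega)
  rw [hA, hB]
  unfold pvRowSpec
  rw [List.range_succ_eq_map]
  simp
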